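-- pv_equiv track=rewrite | github.com/aurumdev95/mycodes | squareguessgui.py | places
-- ===== SOURCE A (Python) =====
-- def places(dec):
-- 		dec = str(dec)
-- 		count = 0
-- 		point = False
-- 		for i in dec:
-- 			if point == True:
-- 				count += 1
-- 			elif i == ".":
-- 				point = True
-- 			else:
-- 				continue
-- 		if count >= 3:
-- 			return True
-- 		else:
-- 			return False
-- ===== SOURCE B (Python) =====
-- def places(dec):
--     s = str(dec)
--     i = s.find(".")
--     if i == -1:
--         return False
--     return len(s) - i - 1 >= 3
-- ===== Notes on version B (the rewrite author's own statement) =====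
-- stated objective: simpler
-- what changed: Replaced the accumulating scan (count/point state machine over every character) with a closed-form computation: locate the first decimal point with str.find and compare len(s)-i-1 >= 3 by arithmetic.
import Mathlib
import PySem

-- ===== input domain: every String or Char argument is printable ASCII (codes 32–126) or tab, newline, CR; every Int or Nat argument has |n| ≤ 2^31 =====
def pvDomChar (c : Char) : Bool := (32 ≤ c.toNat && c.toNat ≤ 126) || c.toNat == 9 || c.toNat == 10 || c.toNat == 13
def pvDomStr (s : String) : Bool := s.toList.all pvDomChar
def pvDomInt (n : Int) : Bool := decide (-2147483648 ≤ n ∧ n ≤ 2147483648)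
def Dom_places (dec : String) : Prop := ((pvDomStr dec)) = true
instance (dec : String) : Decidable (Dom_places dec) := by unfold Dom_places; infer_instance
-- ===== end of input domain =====

-- B replaces A's count/point accumulating scan by a closed form: first '.' via find, then len - i - 1 ≥ 3.

-- ===== PORT A =====
-- A's loop state: (count, point); the loop body in A's branch order.
def placesStep (st : Int × Bool) (i : Char) : Int × Bool :=
  if st.2 = true then (st.1 + 1, st.2)
  else if i = '.' then (st.1, true)
  else st

def places (dec : String) : Bool :=
  let st := dec.toList.foldl placesStep (0, false)
  if st.1 ≥ 3 then true else false

-- ===== PORT B =====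
def places_alt (dec : String) : Bool :=
  let i := PySem.Str.find dec "."
  if i == -1 then false
  else decide (PySem.Str.len dec - i - 1 ≥ 3)

-- ===== PRECONDITION & SPEC =====
def Spec_places (dec : String) (out : Bool) : Prop := out = places_alt dec
instance (dec : String) (out : Bool) : Decidable (Spec_places dec out) := by unfold Spec_places; infer_instance

-- ===== CLAIM (what is proved, stated in full; the proofs are below) =====
def Claim_equal_places : Prop := ∀ (dec : String), Dom_places dec → Spec_places dec (places dec)

-- ===== LEMMAS AND PROOFS =====

theorem placesStep_after (cs : List Char) (c : Int) :
    cs.foldl placesStep (c, true) = (c + cs.length, true) := by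
  induction cs generalizing c with
  | nil => simp [placesStep]
  | cons h t ih => simp [placesStep, ih]; push_cast; ring

theorem placesStep_before (cs : List Char) (c : Int) :
    cs.foldl placesStep (c, false) =
      if '.' ∈ cs then (c + cs.length - (cs.idxOf '.') - 1, true) else (c, false) := by
  induction cs generalizing c with
  | nil => simp
  | cons h t ih =>
    by_cases hd : h = '.'
    · subst hd
      simp [placesStep, placesStep_after, List.idxOf_cons_self]
      push_cast; ring
    · have : List.idxOf '.' (h :: t) = List.idxOf '.' t + 1 := by
        simp [List.idxOf_cons, hd, Ne.symm hd]
      simp [placesStep, hd, ih, this, Ne.symm hd]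
      by_cases hm : '.' ∈ t
      · simp [hm]; push_cast; ring
      · simp [hm]

theorem findGo_dot (cs : List Char) (k : Nat) :
    PySem.Chars.find.go ['.'] cs k =
      if '.' ∈ cs then ((k + cs.idxOf '.' : Nat) : Int) else -1 := by
  induction cs generalizing k with
  | nil => simp [PySem.Chars.find.go]
  | cons h t ih =>
    by_cases hd : h = '.'
    · subst hd
      simp [PySem.Chars.find.go, List.isPrefixOf, List.idxOf_cons_self]
    · have hpre : List.isPrefixOf ['.'] (h :: t) = false := by
        simp [List.isPrefixOf, hd, Ne.symm hd]
      have hidx : List.idxOf '.' (h :: t) = List.idxOf '.' t + 1 := by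
        simp [List.idxOf_cons, hd, Ne.symm hd]
      rw [PySem.Chars.find.go, hpre]
      simp only [Bool.false_eq_true, if_false, ih, hidx, Ne.symm hd]
      by_cases hm : '.' ∈ t
      · simp [hm]; push_cast; ring
      · simp [hm]; exact fun hh => absurd hh (Ne.symm hd)

theorem find_dot (cs : List Char) :
    PySem.Chars.find cs ['.'] = if '.' ∈ cs then ((cs.idxOf '.' : Nat) : Int) else -1 := by
  simpa using findGo_dot cs 0

-- ===== VERDICT (by name: the statement is the Claim_ definition above) =====
theorem places_spec : Claim_equal_places := by
  intro dec _
  unfold Spec_places places places_alt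
  have hsub : (".".toList) = ['.'] := rfl
  simp only [PySem.Str.find, PySem.Str.len_eq, hsub, find_dot, placesStep_before]
  by_cases hm : '.' ∈ dec.toList
  · have hlt : dec.toList.idxOf '.' < dec.toList.length := List.idxOf_lt_length_of_mem hm
    simp only [hm, if_true]
    have hne : ((dec.toList.idxOf '.' : Nat) : Int) ≠ -1 := by omega
    simp only [beq_iff_eq, hne, if_false]
    have hlen : dec.toList.length = dec.length := by simp
    split_ifs with h
    · simp; omega
    · simp; omega
  · simp [hm]
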